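-- pv_equiv track=rewrite | github.com/FIREpresent/EGE | 27092024/№16.py | func
-- ===== SOURCE A (Python) =====
-- def func(A):
--     count = 0
--     for m in range(1000):
--         for n in range(1000):
--             if (3 * m + 4 * n > 63) or ((m <= A) and (n < A)):
--                 count += 1
--     if count == 1000*1000:
--         return 1
--     return 0
-- ===== SOURCE B (Python) =====
-- def func(A):
--     # The region {3m+4n <= 63, 0<=m,n<1000} has max m = 21 and max n = 15,
--     # so the universal condition holds exactly when A >= 21.
--     return 1 if A >= 21 else 0
-- ===== Notes on version B (the rewrite author's own statement) =====
-- stated objective: faster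
-- what changed: Replaced the 1000x1000 brute-force scan by the analytic threshold A >= 21 derived from the region bounds 3m+4n <= 63 (max m = 21, max n = 15).
import Mathlib
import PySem

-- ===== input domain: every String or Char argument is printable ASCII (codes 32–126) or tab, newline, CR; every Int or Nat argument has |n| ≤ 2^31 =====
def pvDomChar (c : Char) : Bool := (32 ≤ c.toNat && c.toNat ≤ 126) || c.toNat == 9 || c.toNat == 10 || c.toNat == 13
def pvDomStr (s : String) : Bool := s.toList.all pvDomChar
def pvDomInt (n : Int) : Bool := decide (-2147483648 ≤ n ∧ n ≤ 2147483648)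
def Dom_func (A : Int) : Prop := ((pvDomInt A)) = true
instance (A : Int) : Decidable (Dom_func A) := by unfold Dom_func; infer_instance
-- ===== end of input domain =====

-- B replaces A's 1000x1000 brute-force count by the closed-form threshold A >= 21 (faster, same value).

-- ===== PORT A =====
def func (A : Int) : Int :=
  let count : Int :=
    (PySem.List.pyRange 0 1000 1).foldl (fun c m =>
      (PySem.List.pyRange 0 1000 1).foldl (fun c n =>
        if 3 * m + 4 * n > 63 ∨ (m ≤ A ∧ n < A) then c + 1 else c) c) 0
  if count = 1000 * 1000 then 1 else 0

-- ===== PORT B =====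
def func_alt (A : Int) : Int := if A ≥ 21 then 1 else 0

-- ===== PRECONDITION & SPEC =====
def Spec_func (A : Int) (out : Int) : Prop := out = func_alt A
instance (A : Int) (out : Int) : Decidable (Spec_func A out) := by unfold Spec_func; infer_instance

-- ===== CLAIM (what is proved, stated in full; the proofs are below) =====
def Claim_equal_func : Prop := ∀ (A : Int), Dom_func A → Spec_func A (func A)

-- ===== LEMMAS AND PROOFS =====

-- counting fold = init + number of satisfying elements
theorem pv_foldl_count (A : Int) (m : Int) (l : List Int) (c : Int) :
    l.foldl (fun c n => if 3 * m + 4 * n > 63 ∨ (m ≤ A ∧ n < A) then c + 1 else c) c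
      = c + ((l.countP (fun n => decide (3 * m + 4 * n > 63 ∨ (m ≤ A ∧ n < A)))) : Int) := by
  induction l generalizing c with
  | nil => simp
  | cons x xs ih =>
      simp only [List.foldl_cons, List.countP_cons, ih]
      by_cases h : 3 * m + 4 * x > 63 ∨ (m ≤ A ∧ x < A) <;> simp [h] <;> ring

-- the outer fold is the sum of the inner counts
theorem pv_outer_fold (A : Int) (l : List Int) (c : Int) :
    l.foldl (fun c m =>
      (PySem.List.pyRange 0 1000 1).foldl (fun c n =>
        if 3 * m + 4 * n > 63 ∨ (m ≤ A ∧ n < A) then c + 1 else c) c) c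
      = c + (l.map (fun m =>
          (((PySem.List.pyRange 0 1000 1).countP
              (fun n => decide (3 * m + 4 * n > 63 ∨ (m ≤ A ∧ n < A)))) : Int))).sum := by
  induction l generalizing c with
  | nil => simp only [List.foldl_nil, List.map_nil, List.sum_nil, add_zero]
  | cons x xs ih =>
      rw [List.foldl_cons, pv_foldl_count, ih, List.map_cons, List.sum_cons]
      ring

-- each inner count is at most 1000
theorem pv_inner_le (A m : Int) :
    (((PySem.List.pyRange 0 1000 1).countP
        (fun n => decide (3 * m + 4 * n > 63 ∨ (m ≤ A ∧ n < A)))) : Int) ≤ 1000 := by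
  have h : ((PySem.List.pyRange 0 1000 1).countP
      (fun n => decide (3 * m + 4 * n > 63 ∨ (m ≤ A ∧ n < A)))) ≤ 1000 := by
    calc _ ≤ (PySem.List.pyRange 0 1000 1).length := List.countP_le_length
      _ = 1000 := by rw [PySem.List.length_pyRange_one]; decide
  exact_mod_cast h

-- when A ≥ 21 the condition holds on all of [0,1000)², so every inner count is full
theorem pv_inner_full (A m : Int) (hA : 21 ≤ A) (hm : 0 ≤ m) :
    ((PySem.List.pyRange 0 1000 1).countP
        (fun n => decide (3 * m + 4 * n > 63 ∨ (m ≤ A ∧ n < A)))) = 1000 := by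
  have h : ∀ n ∈ PySem.List.pyRange 0 1000 1,
      (fun n => decide (3 * m + 4 * n > 63 ∨ (m ≤ A ∧ n < A))) n = true := by
    intro n hn
    rw [PySem.List.mem_pyRange_one] at hn
    simp only [decide_eq_true_eq]
    omega
  rw [List.countP_eq_length.mpr h, PySem.List.length_pyRange_one]; decide

-- when A ≤ 20, n = 0 fails at m = 21, so the inner count at m = 21 is not full
theorem pv_inner_21_lt (A : Int) (hA : A ≤ 20) :
    (((PySem.List.pyRange 0 1000 1).countP
        (fun n => decide (3 * 21 + 4 * n > 63 ∨ ((21 : Int) ≤ A ∧ n < A)))) : Int) < 1000 := by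
  have hne : ((PySem.List.pyRange 0 1000 1).countP
      (fun n => decide (3 * 21 + 4 * n > 63 ∨ ((21 : Int) ≤ A ∧ n < A)))) ≠ 1000 := by
    intro h
    have hfull := List.countP_eq_length.mp (by
      rw [h, PySem.List.length_pyRange_one]; decide)
    have h0 := hfull 0 (by rw [PySem.List.mem_pyRange_one]; omega)
    simp only [decide_eq_true_eq] at h0
    omega
  have hle : ((PySem.List.pyRange 0 1000 1).countP
      (fun n => decide (3 * 21 + 4 * n > 63 ∨ ((21 : Int) ≤ A ∧ n < A)))) ≤ 1000 := by
    calc _ ≤ (PySem.List.pyRange 0 1000 1).length := List.countP_le_length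
      _ = 1000 := by rw [PySem.List.length_pyRange_one]; decide
  have : ((PySem.List.pyRange 0 1000 1).countP
      (fun n => decide (3 * 21 + 4 * n > 63 ∨ ((21 : Int) ≤ A ∧ n < A)))) < 1000 := by omega
  exact_mod_cast this

theorem pv_count_eq (A : Int) :
    (PySem.List.pyRange 0 1000 1).foldl (fun c m =>
      (PySem.List.pyRange 0 1000 1).foldl (fun c n =>
        if 3 * m + 4 * n > 63 ∨ (m ≤ A ∧ n < A) then c + 1 else c) c) 0
      = ((PySem.List.pyRange 0 1000 1).map (fun m =>
          (((PySem.List.pyRange 0 1000 1).countP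
              (fun n => decide (3 * m + 4 * n > 63 ∨ (m ≤ A ∧ n < A)))) : Int))).sum := by
  rw [pv_outer_fold]; ring

-- ===== VERDICT =====
theorem func_spec : Claim_equal_func := by
  intro A _
  unfold Spec_func func func_alt
  simp only [pv_count_eq]
  by_cases hA : 21 ≤ A
  · have hmap : (PySem.List.pyRange 0 1000 1).map (fun m =>
        (((PySem.List.pyRange 0 1000 1).countP
            (fun n => decide (3 * m + 4 * n > 63 ∨ (m ≤ A ∧ n < A)))) : Int))
        = (PySem.List.pyRange 0 1000 1).map (fun _ => (1000 : Int)) := by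
      apply List.map_congr_left
      intro m hm
      rw [PySem.List.mem_pyRange_one] at hm
      rw [pv_inner_full A m hA hm.1]; norm_num
    rw [hmap, PySem.List.sum_map_const_int, PySem.List.length_pyRange_one]
    simp [hA, ge_iff_le]
  · have hlt : ((PySem.List.pyRange 0 1000 1).map (fun m =>
        (((PySem.List.pyRange 0 1000 1).countP
            (fun n => decide (3 * m + 4 * n > 63 ∨ (m ≤ A ∧ n < A)))) : Int))).sum
        < ((PySem.List.pyRange 0 1000 1).map (fun _ => (1000 : Int))).sum := by
      apply List.sum_lt_sum
      · intro m _; exact pv_inner_le A m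
      · exact ⟨21, by rw [PySem.List.mem_pyRange_one]; omega,
          pv_inner_21_lt A (by omega)⟩
    rw [PySem.List.sum_map_const_int, PySem.List.length_pyRange_one] at hlt
    have : ¬ (((PySem.List.pyRange 0 1000 1).map (fun m =>
        (((PySem.List.pyRange 0 1000 1).countP
            (fun n => decide (3 * m + 4 * n > 63 ∨ (m ≤ A ∧ n < A)))) : Int))).sum
        = 1000 * 1000) := by
      intro h; rw [h] at hlt; norm_num at hlt
    simp only [this, if_false]
    simp [hA, ge_iff_le]
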